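-- pv_equiv track=rewrite | github.com/vlad-marlo/algorithms | school/webium/hw/april/15/a.py | solution
-- ===== SOURCE A (Python) =====
-- def solution(data: list[int]) -> int:
--     data = list(map(lambda x: x // 48 + int(x % 48 != 0), data))
--     sm = sum(data)
--     c = 0
--     for i in range(len(data)):
--         c += i * data[i]
--     ans = c
--     b = data[0]
--     for i in data[1:]:
--         c += 2 * b - sm
--         if i != 0:
--             ans = min(ans, c)
--         b += i
--     return ans
-- ===== SOURCE B (Python) =====
-- def solution(data: list[int]) -> int:
--     # Prefix-table re-implementation: evaluate each candidate position independently
--     # via cumulative count/weight arrays instead of A's sliding accumulator.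
--     d = [x // 48 + (x % 48 != 0) for x in data]
--     n = len(d)
--     C = [0] * (n + 1)
--     W = [0] * (n + 1)
--     for i in range(n):
--         C[i + 1] = C[i] + d[i]
--         W[i + 1] = W[i] + i * d[i]
--     ctot, wtot = C[n], W[n]
--     return min(p * C[p] - W[p] + (wtot - W[p]) - p * (ctot - C[p])
--                for p in range(n) if p == 0 or d[p] != 0)
-- ===== Notes on version B (the rewrite author's own statement) =====
-- stated objective: alternative
-- what changed: Replaces A's incremental sliding-cost accumulator (carrying c, b across the scan) with prefix count/weight tables and an independent closed-form per-position cost, minimized over the candidate positions.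
-- outside the precondition, e.g. on solution([]): A raises IndexError, B raises ValueError
import Mathlib
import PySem

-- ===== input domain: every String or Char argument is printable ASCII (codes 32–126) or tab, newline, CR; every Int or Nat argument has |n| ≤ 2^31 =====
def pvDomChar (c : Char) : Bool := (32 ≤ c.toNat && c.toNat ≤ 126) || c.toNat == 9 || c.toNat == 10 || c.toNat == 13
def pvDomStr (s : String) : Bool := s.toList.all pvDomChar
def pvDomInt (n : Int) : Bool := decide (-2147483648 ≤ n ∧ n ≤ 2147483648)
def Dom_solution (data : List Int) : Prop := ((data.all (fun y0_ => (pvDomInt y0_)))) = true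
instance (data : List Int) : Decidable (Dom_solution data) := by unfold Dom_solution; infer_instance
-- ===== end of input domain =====

-- B replaces A's sliding accumulator with prefix count/weight tables and an independent
-- closed-form per-position cost (objective: alternative decomposition, same O(n) cost).

-- shared helper: the transform x // 48 + int(x % 48 != 0) (identical line in both Pythons)
def pyTf (x : Int) : Int :=
  PySem.Int.floordiv x 48 + (if PySem.Int.mod x 48 ≠ 0 then (1 : Int) else 0)

-- ===== PORT A =====
def solution (data : List Int) : Int :=
  let d := data.map pyTf
  let sm := d.foldl (· + ·) 0
  -- for i in range(len(data)): c += i * data[i]   (index always in range)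
  let c0 := (List.range d.length).foldl (fun (c : Int) (i : Nat) => c + (i : Int) * d.getD i 0) 0
  -- b = data[0] (raises on []; excluded by Pre_), then: for i in data[1:] (= drop 1)
  let st := (d.drop 1).foldl
    (fun (s : Int × Int × Int) x =>
      (s.1 + 2 * s.2.2 - sm,
       if x != 0 then min s.2.1 (s.1 + 2 * s.2.2 - sm) else s.2.1,
       s.2.2 + x))
    (c0, c0, d.headI)
  st.2.1

-- ===== PORT B =====
-- Source B's prefix-array loop (C[i+1] = C[i] + d[i]; W[i+1] = W[i] + i*d[i]) as structural recursion
def pvBuildPre : List Int → Nat → Int → Int → List Int × List Int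
  | [], _, c, w => ([c], [w])
  | x :: xs, i, c, w =>
    let r := pvBuildPre xs (i + 1) (c + x) (w + (i : Int) * x)
    (c :: r.1, w :: r.2)

def solution_alt (data : List Int) : Int :=
  let d := data.map pyTf
  let n := d.length
  let pre := pvBuildPre d 0 0 0
  let Cs := pre.1
  let Ws := pre.2
  let ctot := Cs.getD n 0
  let wtot := Ws.getD n 0
  let cand := (List.range n).filter (fun p => p == 0 || d.getD p 0 != 0)
  let costs := cand.map (fun (p : Nat) =>
    (p : Int) * Cs.getD p 0 - Ws.getD p 0 + (wtot - Ws.getD p 0)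
      - (p : Int) * (ctot - Cs.getD p 0))
  match costs with
  | [] => 0              -- only when data = []: Python's min raises there (outside Pre_)
  | x :: xs => xs.foldl min x

-- ===== PRECONDITION & SPEC =====
-- Pre_ excludes only the empty list, on which A raises IndexError (data[0]).
def Pre_solution (data : List Int) : Prop := data ≠ []
instance (data : List Int) : Decidable (Pre_solution data) := by unfold Pre_solution; infer_instance
def pvWitness_solution : List Int := [49, 0, 97]

def Spec_solution (data : List Int) (out : Int) : Prop := out = solution_alt data
instance (data : List Int) (out : Int) : Decidable (Spec_solution data out) := by unfold Spec_solution; infer_instance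

-- ===== CLAIM (what is proved, stated in full; the proofs are below) =====
def Claim_equal_solution : Prop := ∀ (data : List Int), Dom_solution data → Pre_solution data → Spec_solution data (solution data)

-- ===== LEMMAS AND PROOFS =====

-- prefix count / prefix weighted sum / per-position cost of the transformed list
def pC (d : List Int) (p : Nat) : Int := ∑ i ∈ Finset.range p, d.getD i 0
def pW (d : List Int) (p : Nat) : Int := ∑ i ∈ Finset.range p, (i : Int) * d.getD i 0
def pg (d : List Int) (p : Nat) : Int :=
  2 * (p : Int) * pC d p - 2 * pW d p + pW d d.length - (p : Int) * pC d d.length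

-- A's per-step min, as a recursion over candidate indices
def refMin (d : List Int) : Nat → Nat → Int → Int
  | _, 0, ans => ans
  | p, k + 1, ans => refMin d (p + 1) k (if d.getD p 0 != 0 then min ans (pg d p) else ans)

lemma pC_succ (d : List Int) (j : Nat) : pC d (j + 1) = pC d j + d.getD j 0 := by
  simp [pC, Finset.sum_range_succ]

lemma pW_succ (d : List Int) (j : Nat) : pW d (j + 1) = pW d j + (j : Int) * d.getD j 0 := by
  simp [pW, Finset.sum_range_succ]

lemma pg_succ (d : List Int) (j : Nat) :
    pg d (j + 1) = pg d j + 2 * pC d (j + 1) - pC d d.length := by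
  simp only [pg, pC_succ, pW_succ]
  push_cast
  ring

lemma foldl_add_sum (d : List Int) : ∀ a : Int,
    d.foldl (· + ·) a = a + pC d d.length := by
  induction d with
  | nil => simp [pC]
  | cons x xs ih =>
    intro a
    rw [List.foldl_cons, ih]
    simp [pC, Finset.sum_range_succ']
    ring

lemma foldl_weight (d : List Int) : ∀ n : Nat, ∀ a : Int,
    (List.range n).foldl (fun (c : Int) (i : Nat) => c + (i : Int) * d.getD i 0) a
      = a + ∑ i ∈ Finset.range n, (i : Int) * d.getD i 0 := by
  intro n
  induction n with
  | zero => simp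
  | succ m ih =>
    intro a
    rw [List.range_succ, List.foldl_append, ih, Finset.sum_range_succ]
    simp
    ring

lemma buildPre_fst (d : List Int) : ∀ (p i : Nat) (c w : Int), p ≤ d.length →
    (pvBuildPre d i c w).1.getD p 0 = c + ∑ j ∈ Finset.range p, d.getD j 0 := by
  induction d with
  | nil =>
    intro p i c w hp
    have hp0 : p = 0 := Nat.le_zero.mp hp
    subst hp0
    simp [pvBuildPre]
  | cons x xs ih =>
    intro p i c w hp
    cases p with
    | zero => simp [pvBuildPre]
    | succ q =>
      simp only [pvBuildPre, List.getD_cons_succ]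
      rw [ih q (i + 1) (c + x) (w + (i : Int) * x) (by simpa using hp),
          Finset.sum_range_succ']
      simp
      ring

lemma buildPre_snd (d : List Int) : ∀ (p i : Nat) (c w : Int), p ≤ d.length →
    (pvBuildPre d i c w).2.getD p 0
      = w + ∑ j ∈ Finset.range p, ((i : Int) + (j : Int)) * d.getD j 0 := by
  induction d with
  | nil =>
    intro p i c w hp
    have hp0 : p = 0 := Nat.le_zero.mp hp
    subst hp0
    simp [pvBuildPre]
  | cons x xs ih =>
    intro p i c w hp
    cases p with
    | zero => simp [pvBuildPre]
    | succ q =>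
      simp only [pvBuildPre, List.getD_cons_succ]
      rw [ih q (i + 1) (c + x) (w + (i : Int) * x) (by simpa using hp),
          Finset.sum_range_succ']
      push_cast
      simp
      ring_nf

lemma loopA (d : List Int) : ∀ (t : List Int) (j : Nat) (ans : Int), d.drop (j + 1) = t →
    ((t.foldl
      (fun (s : Int × Int × Int) x =>
        (s.1 + 2 * s.2.2 - pC d d.length,
         if x != 0 then min s.2.1 (s.1 + 2 * s.2.2 - pC d d.length) else s.2.1,
         s.2.2 + x))
      (pg d j, ans, pC d (j + 1))).2.1) = refMin d (j + 1) t.length ans := by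
  intro t
  induction t with
  | nil => intro j ans _; simp [refMin]
  | cons x t' ih =>
    intro j ans ht
    have hx : d.getD (j + 1) 0 = x := by
      have : d[j+1]? = some x := by
        rw [← List.head?_drop, ht]; rfl
      simp [List.getD_eq_getElem?_getD, this]
    have ht' : d.drop (j + 2) = t' := by
      have := congrArg List.tail ht
      simpa [List.tail_drop] using this
    simp only [List.foldl_cons, List.length_cons, refMin, hx]
    rw [show pg d j + 2 * pC d (j + 1) - pC d d.length = pg d (j + 1) from (pg_succ d j).symm,
        show pC d (j + 1) + x = pC d (j + 2) from by rw [pC_succ d (j+1), hx]]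
    exact ih (j + 1) _ ht'

lemma refMin_eq_filter (d : List Int) : ∀ (k p : Nat) (ans : Int),
    refMin d p k ans
      = ((List.range' p k).filter (fun q => d.getD q 0 != 0)).foldl
          (fun a q => min a (pg d q)) ans := by
  intro k
  induction k with
  | zero => intro p ans; simp [refMin]
  | succ m ih =>
    intro p ans
    rw [List.range'_succ, List.filter_cons]
    by_cases h : (d.getD p 0 != 0) = true
    · rw [if_pos h, List.foldl_cons]
      simp only [refMin, if_pos h]
      exact ih (p + 1) _
    · rw [if_neg h]
      simp only [refMin, if_neg h]
      exact ih (p + 1) _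

-- ===== VERDICT (by name: the statement is the Claim_ definition above) =====
theorem solution_spec : Claim_equal_solution := by
  intro data _ hpre
  unfold Spec_solution
  simp only [solution, solution_alt]
  have hdne : List.map pyTf data ≠ [] := by
    intro h; exact hpre (List.map_eq_nil_iff.mp h)
  generalize hgen : List.map pyTf data = d
  rw [hgen] at hdne
  obtain ⟨m, hm⟩ : ∃ m, d.length = m + 1 :=
    ⟨d.length - 1, by have := List.length_pos_iff.mpr hdne; omega⟩
  -- A side
  have hsm : d.foldl (· + ·) 0 = pC d d.length := by simpa using foldl_add_sum d 0
  have hc0 : (List.range d.length).foldl (fun (c : Int) (i : Nat) => c + (i : Int) * d.getD i 0) 0 = pg d 0 := by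
    rw [foldl_weight d d.length 0]
    simp [pg, pW, pC]
  have hhead : d.headI = pC d 1 := by
    cases d with
    | nil => exact absurd rfl hdne
    | cons z zs => simp [pC]
  have hA : ((d.drop 1).foldl
      (fun (s : Int × Int × Int) x =>
        (s.1 + 2 * s.2.2 - pC d d.length,
         if x != 0 then min s.2.1 (s.1 + 2 * s.2.2 - pC d d.length) else s.2.1,
         s.2.2 + x))
      (pg d 0, pg d 0, pC d 1)).2.1 = refMin d 1 m (pg d 0) := by
    have := loopA d (d.drop 1) 0 (pg d 0) rfl
    simpa [List.length_drop, hm] using this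
  rw [hsm, hc0, hhead, hA]
  -- B side
  have hCs : ∀ p ≤ d.length, (pvBuildPre d 0 0 0).1.getD p 0 = pC d p := by
    intro p hp
    rw [buildPre_fst d p 0 0 0 hp]; simp [pC]
  have hWs : ∀ p ≤ d.length, (pvBuildPre d 0 0 0).2.getD p 0 = pW d p := by
    intro p hp
    rw [buildPre_snd d p 0 0 0 hp]; simp [pW]
  have hcosts : ((List.range d.length).filter (fun p => p == 0 || d.getD p 0 != 0)).map
      (fun (p : Nat) => (p : Int) * (pvBuildPre d 0 0 0).1.getD p 0 - (pvBuildPre d 0 0 0).2.getD p 0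
        + ((pvBuildPre d 0 0 0).2.getD d.length 0 - (pvBuildPre d 0 0 0).2.getD p 0)
        - (p : Int) * ((pvBuildPre d 0 0 0).1.getD d.length 0 - (pvBuildPre d 0 0 0).1.getD p 0))
      = ((List.range d.length).filter (fun p => p == 0 || d.getD p 0 != 0)).map (fun (p : Nat) => pg d p) := by
    apply List.map_congr_left
    intro p hp
    have hplt : p < d.length := List.mem_range.mp (List.mem_filter.mp hp).1
    rw [hCs p hplt.le, hWs p hplt.le, hCs d.length le_rfl, hWs d.length le_rfl]
    simp only [pg]
    ring
  rw [hcosts]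
  have hcand : (List.range d.length).filter (fun p => p == 0 || d.getD p 0 != 0)
      = 0 :: (List.range' 1 m).filter (fun q => d.getD q 0 != 0) := by
    rw [List.range_eq_range', hm, List.range'_succ, List.filter_cons]
    simp only [Nat.zero_add]
    rw [if_pos (by simp)]
    congr 1
    apply List.filter_congr
    intro q hq
    have h1 : 1 ≤ q := (List.mem_range'_1.mp hq).1
    have : (q == 0) = false := by simp; omega
    simp [this]
  rw [hcand]
  simp only [List.map_cons]
  have hg0 : pg d 0 = pg d 0 := rfl
  rw [List.foldl_map]
  rw [refMin_eq_filter d m 1 (pg d 0)]
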